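-- pv_equiv track=rewrite | github.com/paveleroshkinweb/algorithms | algorithms/src/problems/sheeps.py | get_shifts
-- ===== SOURCE A (Python) =====
-- def get_shifts(sheep_row):
--     sheep_count = 0
--     last_sheep_position = None
--     shifts = []
--     for idx in range(len(sheep_row)-1, -1, -1):
--         if sheep_row[idx] == '*':
--             if sheep_count > 0:
--                 diff = last_sheep_position - idx - 1
--                 shift = diff * sheep_count + shifts[-1]
--                 shifts.append(shift)
--             else:
--                 shifts.append(0)
--             sheep_count += 1
--             last_sheep_position = idx
--     return list(reversed(shifts))
-- ===== SOURCE B (Python) =====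
-- def get_shifts(sheep_row):
--     # Closed-form per sheep: shift_k = (sum of sheep positions to the right)
--     #   - r*pos_k - r*(r+1)//2, where r = number of sheep strictly to the right.
--     pos = [i for i, c in enumerate(sheep_row) if c == '*']
--     m = len(pos)
--     total = sum(pos)
--     res = []
--     prefix = 0
--     for k, p in enumerate(pos):
--         prefix += p
--         r = m - 1 - k
--         res.append((total - prefix) - r * p - r * (r + 1) // 2)
--     return res
-- ===== Notes on version B (the rewrite author's own statement) =====
-- stated objective: alternative
-- what changed: A scans the row right-to-left carrying running state (sheep count, last sheep position, last cumulative shift) and reverses at the end; B first extracts the sheep positions and then emits each answer left-to-right from a closed-form expression (suffix position sum minus r*pos minus the r-th triangular number), with no reversal and no dependence on the previous output value.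
import Mathlib
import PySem

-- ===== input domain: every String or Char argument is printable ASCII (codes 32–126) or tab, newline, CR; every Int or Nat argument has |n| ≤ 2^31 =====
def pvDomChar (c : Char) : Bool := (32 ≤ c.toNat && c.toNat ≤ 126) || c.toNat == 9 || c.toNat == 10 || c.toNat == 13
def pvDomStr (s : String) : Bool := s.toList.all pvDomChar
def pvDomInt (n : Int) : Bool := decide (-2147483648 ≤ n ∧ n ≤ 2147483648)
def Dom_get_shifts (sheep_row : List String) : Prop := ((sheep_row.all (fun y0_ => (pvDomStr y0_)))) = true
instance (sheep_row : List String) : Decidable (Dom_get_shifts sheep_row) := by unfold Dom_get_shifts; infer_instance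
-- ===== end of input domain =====

-- B replaces A's right-to-left recurrence (carrying count/last-position/last-shift) by a single
-- left-to-right pass over the sheep positions using a closed-form value per sheep; alternative
-- decomposition, same O(n) cost.

-- ===== PORT A =====
-- state = (sheep_count, last_sheep_position, shifts); shifts[-1] is read only when
-- sheep_count > 0, where the list is nonempty, so the total pyGetD _ (-1) 0 is exact there.
def pvAStep (row : List String) (idx : Nat) (st : Int × Option Int × List Int) :
    Int × Option Int × List Int :=
  let (cnt, lastPos, shifts) := st
  if PySem.List.pyGetD row (idx : Int) "" = "*" then
    let shifts' :=
      if cnt > 0 then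
        let diff := lastPos.getD 0 - (idx : Int) - 1
        shifts ++ [diff * cnt + PySem.List.pyGetD shifts (-1) 0]
      else shifts ++ [0]
    (cnt + 1, some (idx : Int), shifts')
  else (cnt, lastPos, shifts)

-- for idx in range(len(row)-1, -1, -1): pvALoop row k processes idx = k-1, k-2, …, 0
def pvALoop (row : List String) : Nat → (Int × Option Int × List Int) → Int × Option Int × List Int
  | 0, st => st
  | k+1, st => pvALoop row k (pvAStep row k st)

def get_shifts (sheep_row : List String) : List Int :=
  (pvALoop sheep_row sheep_row.length (0, (none : Option Int), ([] : List Int))).2.2.reverse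

-- ===== PORT B =====
def get_shifts_alt (sheep_row : List String) : List Int :=
  let pos : List Int := (PySem.List.enumerate sheep_row).filterMap
    (fun ic => if ic.2 = "*" then some ic.1 else none)
  let m : Int := PySem.List.len pos
  let total : Int := pos.sum
  ((PySem.List.enumerate pos).foldl
    (fun (st : Int × List Int) kp =>
      let pre := st.1 + kp.2
      let r := m - 1 - kp.1
      (pre, st.2 ++ [(total - pre) - r * kp.2 - PySem.Int.floordiv (r * (r + 1)) 2]))
    (0, [])).2

-- ===== PRECONDITION & SPEC =====
def Spec_get_shifts (sheep_row : List String) (out : List Int) : Prop := out = get_shifts_alt sheep_row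
instance (sheep_row : List String) (out : List Int) : Decidable (Spec_get_shifts sheep_row out) := by unfold Spec_get_shifts; infer_instance

-- ===== CLAIM (what is proved, stated in full; the proofs are below) =====
def Claim_equal_get_shifts : Prop := ∀ (sheep_row : List String), Dom_get_shifts sheep_row → Spec_get_shifts sheep_row (get_shifts sheep_row)

-- ===== LEMMAS AND PROOFS =====

-- positions of '*' among indices < k
def pvP (row : List String) (k : Nat) : List Int :=
  (List.range k).filterMap (fun i => if row.getD i "" = "*" then some (i : Int) else none)

-- A's star-branch as a step over a position
def pvStar (st : Int × Option Int × List Int) (p : Int) : Int × Option Int × List Int :=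
  let (cnt, lastPos, shifts) := st
  let shifts' :=
    if cnt > 0 then
      shifts ++ [(lastPos.getD 0 - p - 1) * cnt + PySem.List.pyGetD shifts (-1) 0]
    else shifts ++ [0]
  (cnt + 1, some p, shifts')

def pvTri : Nat → Int
  | 0 => 0
  | t + 1 => pvTri t + (t + 1)

def pvW (q : List Int) (t : Nat) : Int := (q.take t).sum - (t : Int) * q.getD t 0 - pvTri t

theorem pvALoop_eq_foldl (row : List String) (k : Nat) (st : Int × Option Int × List Int) :
    pvALoop row k st = List.foldl pvStar st ((pvP row k).reverse) := by
  induction k generalizing st with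
  | zero => simp [pvALoop, pvP]
  | succ k ih =>
    rw [pvALoop, ih]
    by_cases h : row.getD k "" = "*"
    · have hP : pvP row (k+1) = pvP row k ++ [(k:Int)] := by
        simp [pvP, List.range_succ, List.filterMap_append, List.getD_eq_getElem?_getD] at h ⊢
        simp [h]
      have hstep : pvAStep row k st = pvStar st ((k : Nat) : Int) := by
        simp only [List.getD_eq_getElem?_getD] at h
        simp [pvAStep, pvStar, h]
      rw [hP, List.reverse_append, List.reverse_singleton, List.singleton_append,
        List.foldl_cons, hstep]
    · have hP : pvP row (k+1) = pvP row k := by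
        simp only [List.getD_eq_getElem?_getD] at h
        simp [pvP, List.range_succ, List.filterMap_append, h]
      have hstep : pvAStep row k st = st := by
        simp only [List.getD_eq_getElem?_getD] at h
        simp [pvAStep, h]
      rw [hP, hstep]

theorem pvFoldl_star (q : List Int) :
    List.foldl pvStar ((0 : Int), (none : Option Int), ([] : List Int)) q
      = ((q.length : Int), q.getLast?, (List.range q.length).map (pvW q)) := by
  induction q using List.reverseRecOn with
  | nil => simp
  | append_singleton q p ih =>
    rw [List.foldl_append, ih, List.foldl_cons, List.foldl_nil]
    by_cases hq : q = []
    · subst hq; simp [pvStar, pvW, pvTri]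
    · obtain ⟨t, ht⟩ : ∃ t, q.length = t + 1 := ⟨q.length - 1, by cases q <;> simp_all⟩
      have htlt : t < q.length := by omega
      have hs : (List.range q.length).map (pvW q) ≠ [] := by simp [ht]
      have hlast : ((List.range q.length).map (pvW q)).getLast hs = pvW q t := by
        rw [List.getLast_eq_getElem]; simp [ht]
      have hpos : (0:Int) < (q.length : Int) := by exact_mod_cast Nat.pos_of_ne_zero (by omega)
      have hgl : q.getLast hq = q.getD t 0 := by
        rw [List.getLast_eq_getElem, List.getD_eq_getElem _ _ htlt]; congr 1; omega
      simp only [pvStar]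
      rw [if_pos hpos, PySem.List.pyGetD_neg_one _ 0 hs, hlast,
        List.getLast?_eq_some_getLast hq, Option.getD_some]
      refine Prod.ext ?_ (Prod.ext ?_ ?_)
      · simp
      · simp
      · show (List.range q.length).map (pvW q)
            ++ [(q.getLast hq - p - 1) * (q.length : Int) + pvW q t]
          = (List.range (q ++ [p]).length).map (pvW (q ++ [p]))
        rw [List.length_append, List.length_cons, List.length_nil, List.range_succ,
          List.map_append]
        congr 1
        · refine List.map_congr_left (fun i hi => ?_)
          have hi' : i < q.length := List.mem_range.mp hi
          simp only [pvW]
          rw [List.take_append_of_le_length (le_of_lt hi'), List.getD_append _ _ _ _ hi']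
        · have hsum : q.sum = (q.take t).sum + q.getD t 0 := by
            conv_lhs => rw [← List.take_length (l := q), ht, List.take_add_one]
            rw [List.sum_append, List.getD_eq_getElem _ _ htlt]
            simp [List.getElem?_eq_getElem htlt]
          show _ = [pvW (q ++ [p]) q.length]
          simp only [pvW]
          have hgetD : (q ++ [p]).getD q.length 0 = p := by
            rw [List.getD_eq_getElem _ _ (by simp), List.getElem_concat_length rfl]
          rw [List.take_left, hgetD, hgl, hsum]
          simp only [ht, pvTri]
          push_cast
          ring_nf

theorem pvTri_eq_floordiv (t : Nat) :
    pvTri t = PySem.Int.floordiv ((t : Int) * ((t : Int) + 1)) 2 := by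
  induction t with
  | zero => decide
  | succ t ih =>
      have h2 : (0:Int) < 2 := by norm_num
      rw [pvTri, ih, PySem.Int.floordiv_eq_ediv_of_pos h2, PySem.Int.floordiv_eq_ediv_of_pos h2]
      push_cast
      have : ((t:Int)+1) * (((t:Int)+1)+1) = (t:Int) * ((t:Int)+1) + ((t:Int)+1) * 2 := by ring
      rw [this, Int.add_mul_ediv_right _ _ (by norm_num : (2:Int) ≠ 0)]

theorem get_shifts_eq (row : List String) :
    get_shifts row = ((List.range (pvP row row.length).length).map
      (pvW (pvP row row.length).reverse)).reverse := by
  rw [get_shifts, pvALoop_eq_foldl, pvFoldl_star]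
  simp

theorem pvBfold (m total : Int) (l : List Int) (s : Int) (acc : Int × List Int) :
    (PySem.List.enumerate l s).foldl
      (fun (st : Int × List Int) kp =>
        (st.1 + kp.2, st.2 ++ [(total - (st.1 + kp.2)) - (m - 1 - kp.1) * kp.2
          - PySem.Int.floordiv ((m - 1 - kp.1) * ((m - 1 - kp.1) + 1)) 2])) acc
      = (acc.1 + l.sum, acc.2 ++ (List.range l.length).map (fun j =>
          (total - (acc.1 + (l.take (j+1)).sum)) - (m - 1 - (s + j)) * l.getD j 0
            - PySem.Int.floordiv ((m - 1 - (s + j)) * ((m - 1 - (s + j)) + 1)) 2)) := by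
  induction l generalizing s acc with
  | nil => simp [PySem.List.enumerate_nil]
  | cons x l ih =>
    rw [PySem.List.enumerate_cons, List.foldl_cons, ih]
    refine Prod.ext ?_ ?_
    · simp; ring
    · show _ = acc.2 ++ (List.range (l.length + 1)).map _
      rw [List.range_succ_eq_map, List.map_cons, List.map_map, List.append_assoc,
        List.singleton_append]
      simp
      intro a ha
      have h1 : m - 1 - (s + 1 + (a:Int)) = m - 1 - (s + ((a:Int) + 1)) := by ring
      rw [h1]
      ring

theorem pvEnumFilter (l : List String) (s : Int) :
    (PySem.List.enumerate l s).filterMap (fun ic => if ic.2 = "*" then some ic.1 else none)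
      = (List.range l.length).filterMap
          (fun i => if l.getD i "" = "*" then some (s + (i : Int)) else none) := by
  induction l generalizing s with
  | nil => simp [PySem.List.enumerate_nil]
  | cons x l ih =>
    rw [PySem.List.enumerate_cons, List.filterMap_cons, ih]
    simp only [List.length_cons]
    rw [List.range_succ_eq_map, List.filterMap_cons, List.filterMap_map]
    have harg : ∀ i : Nat, s + ((i : Int) + 1) = s + 1 + (i : Int) := by intro i; ring
    by_cases hx : x = "*" <;>
      simp [hx, Function.comp, harg]

theorem pvPosL (row : List String) :
    (PySem.List.enumerate row).filterMap (fun ic => if ic.2 = "*" then some ic.1 else none)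
      = pvP row row.length := by
  rw [pvEnumFilter, pvP]
  simp

theorem get_shifts_alt_eq (row : List String) :
    get_shifts_alt row =
      (List.range (pvP row row.length).length).map (fun j =>
        ((pvP row row.length).sum - ((pvP row row.length).take (j+1)).sum)
          - (((pvP row row.length).length : Int) - 1 - j) * (pvP row row.length).getD j 0
          - PySem.Int.floordiv ((((pvP row row.length).length : Int) - 1 - j)
              * ((((pvP row row.length).length : Int) - 1 - j) + 1)) 2) := by
  rw [get_shifts_alt, pvPosL]
  simp only [PySem.List.len_eq]
  rw [pvBfold]
  simp

theorem pvRevMap (q : List Int) :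
    ((List.range q.length).map (pvW q.reverse)).reverse
      = (List.range q.length).map (fun j =>
          (q.sum - (q.take (j+1)).sum) - ((q.length : Int) - 1 - j) * q.getD j 0
            - PySem.Int.floordiv (((q.length : Int) - 1 - j)
                * (((q.length : Int) - 1 - j) + 1)) 2) := by
  apply List.ext_getElem
  · simp
  · intro j h1 h2
    simp only [List.length_reverse, List.length_map, List.length_range] at h1
    rw [List.getElem_reverse, List.getElem_map, List.getElem_map, List.getElem_range,
      List.getElem_range]
    simp only [List.length_map, List.length_range]
    set n := q.length with hn
    have hj : j < n := h1
    have hcast : (((n - 1 - j : Nat)) : Int) = (n : Int) - 1 - j := by omega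
    rw [pvW]
    have ha : (q.reverse.take (n - 1 - j)).sum = q.sum - (q.take (j+1)).sum := by
      rw [List.take_reverse, List.sum_reverse]
      have hd : q.length - (n - 1 - j) = j + 1 := by omega
      rw [hd]
      have := List.sum_take_add_sum_drop q (j+1)
      omega
    have hb : q.reverse.getD (n - 1 - j) 0 = q.getD j 0 := by
      rw [List.getD_eq_getElem _ _ (by simp; omega), List.getElem_reverse,
        List.getD_eq_getElem _ _ hj]
      congr 1
      omega
    rw [ha, hb, hcast, pvTri_eq_floordiv, hcast]

-- ===== VERDICT (by name: the statement is the Claim_ definition above) =====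
theorem get_shifts_spec : Claim_equal_get_shifts := by
  intro row _
  show get_shifts row = get_shifts_alt row
  rw [get_shifts_eq, get_shifts_alt_eq, pvRevMap]
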